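-- pv_equiv track=rewrite | github.com/willir/cryptoResearch | numUtils.py | toArray
-- ===== SOURCE A (Python) =====
-- def toArray(num: int, width: int=0, reverse: bool=False):
--     res = []
--     while num > 0:
--         res.append(num & 0xf)
--         num >>= 4
--     if len(res) < width:
--         res.extend([0] * (width-len(res)))
--     if not reverse:
--         res.reverse()
--     return res
-- ===== SOURCE B (Python) =====
-- def toArray(num: int, width: int=0, reverse: bool=False):
--     s = format(num, 'x') if num > 0 else ''
--     digits = [int(c, 16) for c in s]
--     if len(digits) < width:
--         digits = [0] * (width - len(digits)) + digits
--     return digits[::-1] if reverse else digits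
-- ===== Notes on version B (the rewrite author's own statement) =====
-- stated objective: idiomatic
-- what changed: Replaces the LSB-first bit-shift loop plus in-place reverse with a direct hex-string conversion (format(num,'x')) mapped to digits MSB-first, with padding prepended instead of appended.
import Mathlib
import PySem

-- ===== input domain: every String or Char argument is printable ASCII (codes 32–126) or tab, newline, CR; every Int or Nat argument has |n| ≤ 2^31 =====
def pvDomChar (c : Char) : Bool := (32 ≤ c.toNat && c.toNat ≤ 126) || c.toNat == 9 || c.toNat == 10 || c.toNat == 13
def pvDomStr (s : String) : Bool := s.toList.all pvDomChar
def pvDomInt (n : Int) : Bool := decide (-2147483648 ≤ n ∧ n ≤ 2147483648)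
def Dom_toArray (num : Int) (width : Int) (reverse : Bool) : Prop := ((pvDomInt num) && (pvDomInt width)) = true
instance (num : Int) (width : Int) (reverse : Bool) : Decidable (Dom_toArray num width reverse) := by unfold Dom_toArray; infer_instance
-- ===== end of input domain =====

-- B replaces A's LSB-first bit-shift loop and final in-place reverse by a direct hex-string
-- conversion mapped to MSB-first digits with padding prepended (idiomatic; same cost).


-- ===== PORT A =====
-- the 'while num > 0' loop; 'num & 0xf' and 'num >>= 4' are evaluated only when num > 0,
-- where they are exactly mod 16 and floor division by 16
def toArrayLoop (num : Int) : List Int :=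
  if _h : 0 < num then
    PySem.Int.mod num 16 :: toArrayLoop (PySem.Int.floordiv num 16)
  else []
termination_by num.toNat
decreasing_by
  rw [PySem.Int.floordiv_eq_ediv_of_pos (by omega : (0:Int) < 16)]
  omega

def toArray (num : Int) (width : Int) (reverse : Bool) : List Int :=
  let res := toArrayLoop num
  let res := if (res.length : Int) < width then
      res ++ List.replicate (width - (res.length : Int)).toNat 0 else res
  if !reverse then res.reverse else res

-- ===== PORT B =====
-- hand port of format(num,'x') (exact for num > 0, the only place Source B evaluates it):
-- most-significant hex digit first, lowercase
def hexDigitChar (d : Int) : Char :=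
  (['0','1','2','3','4','5','6','7','8','9','a','b','c','d','e','f']).getD d.toNat '0'

def hexFormat (n : Int) : List Char :=
  if _h : 0 < n then
    hexFormat (PySem.Int.floordiv n 16) ++ [hexDigitChar (PySem.Int.mod n 16)]
  else []
termination_by n.toNat
decreasing_by
  rw [PySem.Int.floordiv_eq_ediv_of_pos (by omega : (0:Int) < 16)]
  omega

-- hand port of int(c, 16) (exact on the lowercase hex digits format produces)
def hexVal (c : Char) : Int :=
  (['0','1','2','3','4','5','6','7','8','9','a','b','c','d','e','f']).idxOf c

def toArray_alt (num : Int) (width : Int) (reverse : Bool) : List Int :=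
  let s := if 0 < num then hexFormat num else []
  let digits := s.map hexVal
  let digits := if (digits.length : Int) < width then
      List.replicate (width - (digits.length : Int)).toNat 0 ++ digits else digits
  if reverse then digits.reverse else digits

-- ===== PRECONDITION & SPEC =====
def Spec_toArray (num : Int) (width : Int) (reverse : Bool) (out : List Int) : Prop := out = toArray_alt num width reverse
instance (num : Int) (width : Int) (reverse : Bool) (out : List Int) : Decidable (Spec_toArray num width reverse out) := by unfold Spec_toArray; infer_instance

-- ===== CLAIM (what is proved, stated in full; the proofs are below) =====
def Claim_equal_toArray : Prop := ∀ (num : Int) (width : Int) (reverse : Bool), Dom_toArray num width reverse → Spec_toArray num width reverse (toArray num width reverse)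

-- ===== LEMMAS AND PROOFS =====

theorem hexVal_hexDigitChar (d : Int) (h0 : 0 ≤ d) (h16 : d < 16) :
    hexVal (hexDigitChar d) = d := by
  interval_cases d <;> decide

theorem map_hexVal_hexFormat (n : Int) :
    (hexFormat n).map hexVal = (toArrayLoop n).reverse := by
  rw [hexFormat, toArrayLoop]
  split
  · rename_i h
    rw [List.map_append, map_hexVal_hexFormat (PySem.Int.floordiv n 16),
        PySem.Int.mod_eq_emod_of_pos (by omega : (0:Int) < 16)]
    have h1 : 0 ≤ n % 16 := Int.emod_nonneg n (by omega)
    have h2 : n % 16 < 16 := Int.emod_lt_of_pos n (by omega)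
    simp [hexVal_hexDigitChar _ h1 h2]
  · simp
termination_by n.toNat
decreasing_by
  rw [PySem.Int.floordiv_eq_ediv_of_pos (by omega : (0:Int) < 16)]
  rename_i h
  omega

theorem toArray_eq_alt (num width : Int) (reverse : Bool) :
    toArray num width reverse = toArray_alt num width reverse := by
  unfold toArray toArray_alt
  have hs : (if 0 < num then hexFormat num else []) = hexFormat num := by
    split
    · rfl
    · rw [hexFormat]; simp_all
  simp only [hs, map_hexVal_hexFormat, List.length_reverse]
  by_cases hw : ((toArrayLoop num).length : Int) < width <;>
    cases reverse <;>
      simp [hw, List.reverse_append, List.reverse_replicate]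

-- ===== VERDICT (by name: the statement is the Claim_ definition above) =====
theorem toArray_spec : Claim_equal_toArray := by
  intro num width reverse _
  unfold Spec_toArray
  exact toArray_eq_alt num width reverse
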